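-- pv_equiv track=rewrite | github.com/pedroma2000/ASI | ASI_FP_4/ASI_FP_4_ex2_Stats.py | urlMaisVisitado
-- ===== SOURCE A (Python) =====
-- def urlMaisVisitado(urls):
--     max = 0;
--
--     for url in urls.keys():
--         num_visitas = 0
--
--         for data in urls[url].keys():
--             num_visitas += len(urls[url][data])
--
--             if num_visitas > max:
--                 urlMax = url
--                 max = num_visitas
--
--     return urlMax, max
-- ===== SOURCE B (Python) =====
-- def urlMaisVisitado(urls):
--     # Phase 1: total visits per url; Phase 2: separate strict-> argmax scan.
--     totals = {url: sum(len(visits) for visits in urls[url].values()) for url in urls}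
--     best = 0
--     for url, total in totals.items():
--         if total > best:
--             urlMax = url
--             best = total
--     return urlMax, best
-- ===== Notes on version B (the rewrite author's own statement) =====
-- stated objective: alternative
-- what changed: A threads a single running max through a nested loop with the comparison on every partial sum; B first builds a totals dict (url -> total visits) and then runs a separate strict-greater argmax pass over it.
import Mathlib
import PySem

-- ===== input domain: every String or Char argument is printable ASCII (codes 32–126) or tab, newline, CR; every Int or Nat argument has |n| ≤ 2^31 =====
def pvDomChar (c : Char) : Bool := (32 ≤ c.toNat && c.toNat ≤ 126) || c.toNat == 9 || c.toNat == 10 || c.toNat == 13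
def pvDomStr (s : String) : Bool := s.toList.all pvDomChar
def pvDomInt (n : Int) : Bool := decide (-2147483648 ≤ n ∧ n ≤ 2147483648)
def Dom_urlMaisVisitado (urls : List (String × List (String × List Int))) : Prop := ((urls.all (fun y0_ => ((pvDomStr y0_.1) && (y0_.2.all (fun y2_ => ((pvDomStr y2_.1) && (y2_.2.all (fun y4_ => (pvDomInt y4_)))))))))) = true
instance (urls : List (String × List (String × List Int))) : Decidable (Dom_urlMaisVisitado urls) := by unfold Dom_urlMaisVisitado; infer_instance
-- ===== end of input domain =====

-- B replaces A's single nested loop (running max checked on every partial sum) by a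
-- totals-dict phase followed by a separate argmax pass; return value only, same cost.

-- ===== PORT A =====
-- state: (urlMax as Option String since Python leaves it unassigned, max);
-- inner state additionally carries num_visitas last.
def urlMaisVisitado (urls : List (String × List (String × List Int))) : String × Int :=
  let d := PySem.Dict.ofList urls
  let st := d.items.foldl
    (fun (st : Option String × Int) p =>
      let r := ((PySem.Dict.ofList p.2).items).foldl
        (fun (s : Option String × Int × Int) q =>
          let nv := s.2.2 + (q.2.length : Int)
          if nv > s.2.1 then (some p.1, nv, nv) else (s.1, s.2.1, nv))
        (st.1, st.2, 0)
      (r.1, r.2.1))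
    (none, 0)
  match st.1 with
  | some u => (u, st.2)
  | none => ("", st.2)   -- Python raises UnboundLocalError here; excluded by Pre_

-- ===== PORT B =====
def urlMaisVisitado_alt (urls : List (String × List (String × List Int))) : String × Int :=
  let d := PySem.Dict.ofList urls
  let totals := d.items.map
    (fun p => (p.1, (((PySem.Dict.ofList p.2).items).map (fun q => (q.2.length : Int))).sum))
  let st := totals.foldl
    (fun (s : Option String × Int) p => if p.2 > s.2 then (some p.1, p.2) else s)
    (none, 0)
  match st.1 with
  | some u => (u, st.2)
  | none => ("", st.2)   -- Python raises UnboundLocalError here; excluded by Pre_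

-- ===== PRECONDITION & SPEC =====
-- Pre_ excludes exactly the inputs (empty dict or all visit lists empty after dict
-- normalization) on which Python A raises UnboundLocalError (urlMax never assigned).
def Pre_urlMaisVisitado (urls : List (String × List (String × List Int))) : Prop :=
  ∃ p ∈ (PySem.Dict.ofList urls).items, ∃ q ∈ (PySem.Dict.ofList p.2).items, q.2 ≠ []
instance (urls : List (String × List (String × List Int))) : Decidable (Pre_urlMaisVisitado urls) := by unfold Pre_urlMaisVisitado; infer_instance
def pvWitness_urlMaisVisitado : (List (String × List (String × List Int))) := [("a", [("d", [1])])]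

def Spec_urlMaisVisitado (urls : List (String × List (String × List Int))) (out : String × Int) : Prop := out = urlMaisVisitado_alt urls
instance (urls : List (String × List (String × List Int))) (out : String × Int) : Decidable (Spec_urlMaisVisitado urls out) := by unfold Spec_urlMaisVisitado; infer_instance

-- ===== CLAIM (what is proved, stated in full; the proofs are below) =====
def Claim_equal_urlMaisVisitado : Prop := ∀ (urls : List (String × List (String × List Int))), Dom_urlMaisVisitado urls → Pre_urlMaisVisitado urls → Spec_urlMaisVisitado urls (urlMaisVisitado urls)

-- ===== LEMMAS AND PROOFS =====

lemma pv_sum_len_nonneg (qs : List (String × List Int)) :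
    0 ≤ (qs.map (fun q => (q.2.length : Int))).sum := by
  induction qs with
  | nil => simp
  | cons q t ih => simp only [List.map_cons, List.sum_cons]; positivity

-- A's inner loop over one url's dates: provided num_visitas ≤ max on entry (true at
-- entry, where num_visitas = 0 ≤ max), it computes the total and updates (urlMax, max)
-- exactly when the final total beats the incoming max.
lemma pv_inner (url : String) (qs : List (String × List Int)) :
    ∀ (u? : Option String) (mx nv : Int), nv ≤ mx →
    qs.foldl
      (fun (s : Option String × Int × Int) q =>
        let nv := s.2.2 + (q.2.length : Int)
        if nv > s.2.1 then (some url, nv, nv) else (s.1, s.2.1, nv))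
      (u?, mx, nv)
    = ((if nv + (qs.map (fun q => (q.2.length : Int))).sum > mx then some url else u?),
       (if nv + (qs.map (fun q => (q.2.length : Int))).sum > mx
        then nv + (qs.map (fun q => (q.2.length : Int))).sum else mx),
       nv + (qs.map (fun q => (q.2.length : Int))).sum) := by
  induction qs with
  | nil =>
    intro u? mx nv h
    simp only [List.foldl_nil, List.map_nil, List.sum_nil, add_zero]
    rw [if_neg (by omega), if_neg (by omega)]
  | cons q t ih =>
    intro u? mx nv h
    have ht := pv_sum_len_nonneg t
    have hq : (0 : Int) ≤ (q.2.length : Int) := by positivity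
    simp only [List.foldl_cons, List.map_cons, List.sum_cons]
    by_cases hc : nv + (q.2.length : Int) > mx
    · rw [if_pos hc, ih _ _ _ (le_refl _)]
      simp only [Prod.ext_iff]
      refine ⟨?_, ?_, by ring⟩
      · split_ifs <;> first | rfl | (exfalso; omega)
      · split_ifs <;> omega
    · rw [if_neg hc, ih _ _ _ (by omega)]
      simp only [Prod.ext_iff]
      refine ⟨?_, ?_, by ring⟩
      · split_ifs <;> first | rfl | (exfalso; omega)
      · split_ifs <;> omega

-- the two outer loops agree, given the invariant 0 ≤ running max
lemma pv_fold (items : List (String × List (String × List Int))) :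
    ∀ (st : Option String × Int), 0 ≤ st.2 →
    items.foldl
      (fun (st : Option String × Int) p =>
        let r := ((PySem.Dict.ofList p.2).items).foldl
          (fun (s : Option String × Int × Int) q =>
            let nv := s.2.2 + (q.2.length : Int)
            if nv > s.2.1 then (some p.1, nv, nv) else (s.1, s.2.1, nv))
          (st.1, st.2, 0)
        (r.1, r.2.1))
      st
    = items.foldl
      (fun (s : Option String × Int) p =>
        if (((PySem.Dict.ofList p.2).items).map (fun q => (q.2.length : Int))).sum > s.2
        then (some p.1, (((PySem.Dict.ofList p.2).items).map (fun q => (q.2.length : Int))).sum)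
        else s)
      st := by
  induction items with
  | nil => intro st h; rfl
  | cons p rest ih =>
    intro st h
    simp only [List.foldl_cons]
    rw [pv_inner p.1 ((PySem.Dict.ofList p.2).items) st.1 st.2 0 h]
    simp only [zero_add]
    by_cases hc : (((PySem.Dict.ofList p.2).items).map (fun q => (q.2.length : Int))).sum > st.2
    · rw [if_pos hc, if_pos hc, if_pos hc,
        ih _ (le_trans h (le_of_lt hc))]
    · rw [if_neg hc, if_neg hc, if_neg hc]
      exact ih st h

-- ===== VERDICT (by name: the statement is the Claim_ definition above) =====
theorem urlMaisVisitado_spec : Claim_equal_urlMaisVisitado := by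
  intro urls _ _
  unfold Spec_urlMaisVisitado urlMaisVisitado urlMaisVisitado_alt
  simp only []
  rw [List.foldl_map, pv_fold (PySem.Dict.ofList urls).items (none, 0) (le_refl 0)]
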